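-- pv_equiv track=rewrite | github.com/junhoKim-iib/codingTestStudy | junho/PGS/과일 장수.py | solution
-- ===== SOURCE A (Python) =====
-- def solution(k, m, score):
--     answer = 0
--     score = sorted(score, reverse=True)
--
--     times = len(score) // m
--     idx = 0
--
--     for _ in range(times):
--         answer += min(score[idx: idx + m]) * m
--         idx += m
--
--     return answer
-- ===== SOURCE B (Python) =====
-- def solution(k, m, score):
--     boxes = len(score) // m
--     if boxes <= 0:
--         return 0
--     cnt = {}
--     for s in score:
--         cnt[s] = cnt.get(s, 0) + 1
--     total = 0
--     c = 0
--     for v in sorted(cnt, reverse=True):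
--         c2 = c + cnt[v]
--         total += v * (c2 // m - c // m)
--         c = c2
--     return m * total
-- ===== Notes on version B (the rewrite author's own statement) =====
-- stated objective: alternative
-- what changed: B never sorts or scans the elements themselves: it builds a frequency dict in one pass, walks the distinct values once in descending order, and counts how many box-minimum positions (multiples of m) fall inside each value's run via a telescoping floor-division difference (c2//m - c//m), so both the per-box min() scan and the per-element sorted traversal disappear.
import Mathlib
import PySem

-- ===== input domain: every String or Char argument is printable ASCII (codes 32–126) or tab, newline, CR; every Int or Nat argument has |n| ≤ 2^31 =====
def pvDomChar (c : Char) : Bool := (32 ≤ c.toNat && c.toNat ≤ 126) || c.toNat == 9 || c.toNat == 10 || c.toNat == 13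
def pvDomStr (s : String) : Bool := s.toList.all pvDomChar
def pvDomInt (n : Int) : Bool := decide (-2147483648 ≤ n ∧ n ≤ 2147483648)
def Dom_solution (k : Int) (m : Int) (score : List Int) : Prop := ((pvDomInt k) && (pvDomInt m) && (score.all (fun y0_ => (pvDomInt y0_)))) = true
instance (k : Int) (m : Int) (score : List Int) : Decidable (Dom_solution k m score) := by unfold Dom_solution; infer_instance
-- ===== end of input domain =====

-- B replaces sort-and-scan-every-box by a frequency dict walked once over the distinct
-- values in descending order, counting box-minimum positions per value run by a
-- telescoping floor-division difference; objective: alternative algorithm.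

-- ===== PORT A =====
def solution (k : Int) (m : Int) (score : List Int) : Int :=
  -- answer = 0; score = sorted(score, reverse=True); times = len(score) // m; idx = 0
  let score' := PySem.List.sorted score (fun x => x) true
  let times := PySem.Int.floordiv (score'.length : Int) m
  -- for _ in range(times): answer += min(score[idx: idx+m]) * m; idx += m
  let st := (PySem.List.pyRange 0 times 1).foldl
    (fun (st : Int × Int) _ =>
      (st.1 + (PySem.List.min? (PySem.List.slice score' (some st.2) (some (st.2 + m))) (fun x => x)).getD 0 * m,
       st.2 + m))
    (0, 0)
  st.1

-- ===== PORT B =====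
def solution_alt (k : Int) (m : Int) (score : List Int) : Int :=
  -- boxes = len(score) // m; if boxes <= 0: return 0
  let boxes := PySem.Int.floordiv (score.length : Int) m
  if boxes ≤ 0 then 0
  else
    -- cnt = {}; for s in score: cnt[s] = cnt.get(s, 0) + 1
    let cnt := score.foldl (fun (d : PySem.Dict Int Int) s => d.insert s (d.getD s 0 + 1)) PySem.Dict.empty
    -- total = 0; c = 0
    -- for v in sorted(cnt, reverse=True): c2 = c + cnt[v]; total += v * (c2 // m - c // m); c = c2
    let st := (PySem.List.sorted cnt.keys (fun x => x) true).foldl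
      (fun (st : Int × Int) v =>
        let c2 := st.2 + cnt.getD v 0
        (st.1 + v * (PySem.Int.floordiv c2 m - PySem.Int.floordiv st.2 m), c2))
      (0, 0)
    -- return m * total
    m * st.1

-- ===== PRECONDITION & SPEC =====
-- Pre_ excludes exactly m = 0, where Python A (and B) raise ZeroDivisionError on len(score) // m.
def Pre_solution (k : Int) (m : Int) (score : List Int) : Prop := m ≠ 0
instance (k : Int) (m : Int) (score : List Int) : Decidable (Pre_solution k m score) := by unfold Pre_solution; infer_instance

def pvWitness_solution : Int × Int × List Int := (4, 3, [1, 2, 3, 1, 2, 3, 1])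

def Spec_solution (k : Int) (m : Int) (score : List Int) (out : Int) : Prop := out = solution_alt k m score
instance (k : Int) (m : Int) (score : List Int) (out : Int) : Decidable (Spec_solution k m score out) := by unfold Spec_solution; infer_instance

-- ===== CLAIM (what is proved, stated in full; the proofs are below) =====
def Claim_equal_solution : Prop := ∀ (k : Int) (m : Int) (score : List Int), Dom_solution k m score → Pre_solution k m score → Spec_solution k m score (solution k m score)

-- ===== LEMMAS AND PROOFS =====

-- G M c u: sum of the entries of u whose global 1-indexed position (offset c) is a multiple of M
def boxG (M c : Nat) (u : List Int) : Int :=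
  ((List.range u.length).map (fun p => if M ∣ (c + p + 1) then u.getD p 0 else 0)).sum

-- counting multiples of M in (c, c+r] : a telescoping floor-division difference
theorem boxG_replicate (M : Nat) (v : Int) (r c : Nat) :
    boxG M c (List.replicate r v) = v * ((((c + r) / M : Nat) : Int) - ((c / M : Nat) : Int)) := by
  induction r with
  | zero => simp [boxG]
  | succ r ih =>
    have hstep : (c + (r + 1)) / M = (c + r) / M + if M ∣ (c + r + 1) then 1 else 0 := by
      have := Nat.succ_div (a := c + r) (b := M)
      simpa [Nat.add_assoc] using this
    have hget : ∀ p, p < r + 1 → (List.replicate (r + 1) v).getD p 0 = v := by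
      intro p hp; simp [List.getD, List.getElem?_replicate, hp]
    have hget' : ∀ p, p < r → (List.replicate r v).getD p 0 = v := by
      intro p hp; simp [List.getD, List.getElem?_replicate, hp]
    have hrw : ∀ (n : Nat) (u : List Int), (∀ p, p < n → u.getD p 0 = v) →
        ((List.range n).map (fun p => if M ∣ (c + p + 1) then u.getD p 0 else 0)).sum
          = ((List.range n).map (fun p => if M ∣ (c + p + 1) then v else 0)).sum := by
      intro n u h
      apply congrArg
      apply List.map_congr_left
      intro p hp
      rw [List.mem_range] at hp
      rw [h p hp]
    unfold boxG at ih ⊢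
    rw [List.length_replicate] at ih ⊢
    rw [hrw _ _ hget, List.range_succ, List.map_append, List.sum_append,
        ← hrw _ _ hget', ih, hstep]
    by_cases hd : M ∣ (c + r + 1) <;>
      simp [hd] <;> push_cast [Nat.div_le_div_right (Nat.le_add_right c r)] <;> ring

theorem boxG_append (M c : Nat) (a b : List Int) :
    boxG M c (a ++ b) = boxG M c a + boxG M (c + a.length) b := by
  unfold boxG
  rw [List.length_append, List.range_add, List.map_append, List.sum_append]
  congr 1
  · apply congrArg; apply List.map_congr_left
    intro p hp
    rw [List.mem_range] at hp
    simp [List.getD, List.getElem?_append_left hp]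
  · rw [List.map_map]
    apply congrArg; apply List.map_congr_left
    intro p hp
    simp only [Function.comp_def]
    have h1 : c + (a.length + p) + 1 = c + a.length + p + 1 := by omega
    have h2 : (a ++ b).getD (a.length + p) 0 = b.getD p 0 := by
      simp [List.getD, List.getElem?_append_right (Nat.le_add_right a.length p)]
    rw [h1, h2]

-- a descending list bounded by v is its run of v's followed by the rest
theorem run_decomp (v : Int) : ∀ (u : List Int), u.Pairwise (· ≥ ·) → (∀ x ∈ u, x ≤ v) →
    u = List.replicate (u.count v) v ++ u.filter (fun x => x ≠ v) := by
  intro u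
  induction u with
  | nil => intro _ _; simp
  | cons x u ih =>
    intro hp hb
    rcases List.pairwise_cons.mp hp with ⟨hx, hp'⟩
    by_cases hxv : x = v
    · subst hxv
      have hb' : ∀ y ∈ u, y ≤ x := fun y hy => (hb y (List.mem_cons_of_mem _ hy))
      rw [List.count_cons_self, List.replicate_succ]
      simp only [List.filter_cons]
      have : (decide (x ≠ x)) = false := by simp
      rw [this]
      simpa using ih hp' hb'
    · have hlt : ∀ y ∈ x :: u, y < v := by
        intro y hy
        rcases List.mem_cons.mp hy with rfl | hy'
        · exact lt_of_le_of_ne (hb y (by simp)) hxv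
        · exact lt_of_le_of_lt (hx y hy') (lt_of_le_of_ne (hb x (by simp)) hxv)
      have hcnt : (x :: u).count v = 0 := by
        rw [List.count_eq_zero]
        intro hv
        exact absurd rfl (ne_of_lt (hlt v hv))
      have hfil : (x :: u).filter (fun y => y ≠ v) = x :: u := by
        rw [List.filter_eq_self]
        intro y hy
        simpa using ne_of_lt (hlt y hy)
      rw [hcnt, hfil]
      simp

-- the B-side fold over strictly-descending distinct values computes boxG
theorem bmain (M : Nat) (hM : 0 < M) (cntf : Int → Int) :
    ∀ (ks : List Int), ∀ (u : List Int) (c : Nat) (t0 : Int),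
    ks.Pairwise (· > ·) → u.Pairwise (· ≥ ·) → (∀ x, x ∈ ks ↔ x ∈ u) →
    (∀ v ∈ ks, cntf v = (u.count v : Int)) →
    (ks.foldl
      (fun (st : Int × Int) v =>
        (st.1 + v * (PySem.Int.floordiv (st.2 + cntf v) (M : Int) - PySem.Int.floordiv st.2 (M : Int)),
         st.2 + cntf v))
      (t0, (c : Int))).1 = t0 + boxG M c u := by
  intro ks
  induction ks with
  | nil =>
    intro u c t0 _ _ hmem _
    have hu : u = [] := by
      cases u with
      | nil => rfl
      | cons y u => exact absurd ((hmem y).mpr (by simp)) (by simp)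
    subst hu
    simp [boxG]
  | cons v ks ih =>
    intro u c t0 hks hu hmem hcnt
    rcases List.pairwise_cons.mp hks with ⟨hvks, hks'⟩
    have hble : ∀ x ∈ u, x ≤ v := by
      intro x hx
      rcases List.mem_cons.mp ((hmem x).mpr hx) with rfl | hx'
      · exact le_refl x
      · exact le_of_lt (hvks x hx')
    set r := u.count v with hr
    set u' := u.filter (fun x => x ≠ v) with hu'
    have hdec : u = List.replicate r v ++ u' := run_decomp v u hu hble
    have hcv : cntf v = (r : Int) := hcnt v (by simp)
    have hstep : (c : Int) + cntf v = ((c + r : Nat) : Int) := by rw [hcv]; push_cast; ring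
    have hfd1 : PySem.Int.floordiv ((c + r : Nat) : Int) (M : Int) = (((c + r) / M : Nat) : Int) :=
      PySem.Int.floordiv_natCast _ _
    have hfd2 : PySem.Int.floordiv ((c : Nat) : Int) (M : Int) = ((c / M : Nat) : Int) :=
      PySem.Int.floordiv_natCast _ _
    have hu'p : u'.Pairwise (· ≥ ·) := hu.sublist (List.filter_sublist (l := u))
    have hmem' : ∀ x, x ∈ ks ↔ x ∈ u' := by
      intro x
      constructor
      · intro hx
        have hxu : x ∈ u := (hmem x).mp (List.mem_cons_of_mem _ hx)
        have hxv : x ≠ v := ne_of_lt (hvks x hx)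
        rw [hu', List.mem_filter]
        exact ⟨hxu, by simpa using hxv⟩
      · intro hx
        rw [hu', List.mem_filter] at hx
        rcases List.mem_cons.mp ((hmem x).mpr hx.1) with rfl | hx'
        · exact absurd hx.2 (by simp)
        · exact hx'
    have hcnt' : ∀ w ∈ ks, cntf w = (u'.count w : Int) := by
      intro w hw
      have hwv : w ≠ v := ne_of_lt (hvks w hw)
      rw [hcnt w (List.mem_cons_of_mem _ hw)]
      congr 1
      rw [hu']
      rw [List.count_filter (by simpa using hwv)]
    rw [List.foldl_cons]
    have := ih u' (c + r)
      (t0 + v * (PySem.Int.floordiv ((c : Int) + cntf v) (M : Int) - PySem.Int.floordiv ((c : Int)) (M : Int)))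
      hks' hu'p hmem' hcnt'
    rw [hstep] at this ⊢
    rw [this, hdec, boxG_append, boxG_replicate, List.length_replicate, hfd1, hfd2]
    ring

-- boxG at offset 0 is the sum of the elements at positions (j+1)*M - 1
theorem boxG_zero (M : Nat) (hM : 0 < M) (u : List Int) :
    ∀ n : Nat,
    ((List.range n).map (fun p => if M ∣ (p + 1) then u.getD p 0 else 0)).sum
      = ((List.range (n / M)).map (fun j => u.getD ((j + 1) * M - 1) 0)).sum := by
  intro n
  induction n with
  | zero => simp
  | succ n ih =>
    rw [List.range_succ, List.map_append, List.sum_append, ih]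
    have hstep : (n + 1) / M = n / M + if M ∣ (n + 1) then 1 else 0 := Nat.succ_div (a := n) (b := M)
    by_cases hd : M ∣ (n + 1)
    · rw [hstep, if_pos hd]
      rw [List.range_succ, List.map_append, List.sum_append]
      have hidx : (n / M + 1) * M - 1 = n := by
        have h1 : (n + 1) / M * M = n + 1 := Nat.div_mul_cancel hd
        have h2 : (n + 1) / M = n / M + 1 := by rw [hstep, if_pos hd]
        rw [h2] at h1
        omega
      simp [hd, hidx]
    · rw [hstep, if_neg hd]
      simp [hd]

theorem boxG_zero' (M : Nat) (hM : 0 < M) (u : List Int) :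
    boxG M 0 u = ((List.range (u.length / M)).map (fun j => u.getD ((j + 1) * M - 1) 0)).sum := by
  unfold boxG
  rw [← boxG_zero M hM u u.length]
  apply congrArg; apply List.map_congr_left
  intro p _
  norm_num

-- ===== A-side lemmas (descending sort, per-box min via slice) =====

theorem slice_rev (t : List Int) (a M : Nat) (h : a + M ≤ t.length) :
    (t.reverse.drop a).take M = ((t.drop (t.length - (a + M))).take M).reverse := by
  rw [List.drop_reverse, List.take_reverse, List.length_take, List.drop_take]
  congr 2
  · omega
  · congr 1
    omega

theorem head_take_drop (t : List Int) (d M : Nat) (hM : 0 < M) (hd : d < t.length) :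
    ∃ r, (t.drop d).take M = t[d] :: r := by
  have h1 : t.drop d = t[d] :: t.drop (d + 1) := List.drop_eq_getElem_cons hd
  refine ⟨(t.drop (d + 1)).take (M - 1), ?_⟩
  cases M with
  | zero => omega
  | succ M => rw [h1, List.take_succ_cons]; norm_num

theorem min_rev_sorted (x : Int) (r : List Int) (hu : (x :: r).Pairwise (· ≤ ·)) :
    (PySem.List.min? (x :: r).reverse (fun y => y)).getD 0 = x := by
  obtain ⟨y, l, hyl⟩ := List.exists_cons_of_ne_nil (l := (x :: r).reverse) (by simp)
  have hmin : PySem.List.min? (x :: r).reverse (fun y => y) = some (l.foldl min y) := by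
    rw [hyl]; exact PySem.List.min?_id_cons (x := y) (t := l)
  have hvm : l.foldl min y ∈ x :: r := by
    rw [← List.mem_reverse]; exact PySem.List.min?_mem hmin
  have hle : l.foldl min y ≤ x := PySem.List.min?_isMin hmin x (by simp)
  have hge : x ≤ l.foldl min y := by
    rcases List.mem_cons.mp hvm with h | h
    · omega
    · exact (List.pairwise_cons.mp hu).1 _ h
  rw [hmin]
  simp; omega

theorem box_min (t : List Int) (ht : t.Pairwise (· ≤ ·)) (M : Nat) (hM : 0 < M) (k : Nat)
    (hk : k * M + M ≤ t.length) :
    (PySem.List.min? ((t.reverse.drop (k * M)).take M) (fun x => x)).getD 0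
      = t[t.length - (k * M + M)]'(by omega) := by
  have hd : t.length - (k * M + M) < t.length := by omega
  obtain ⟨r, hr⟩ := head_take_drop t (t.length - (k * M + M)) M hM hd
  rw [slice_rev t (k * M) M hk, hr]
  exact min_rev_sorted _ _ (hr ▸ (ht.sublist ((List.take_sublist _ _).trans (List.drop_sublist _ _))))

theorem foldA (m : Int) (F : Int → Int) (L : List Int) :
    ∀ (a i : Int),
    (L.foldl (fun (st : Int × Int) _ => (st.1 + F st.2, st.2 + m)) (a, i))
      = (a + ((List.range L.length).map (fun j : Nat => F (i + (j : Int) * m))).sum, i + L.length * m) := by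
  induction L with
  | nil => intro a i; simp
  | cons x L ih =>
    intro a i
    rw [List.foldl_cons, ih]
    refine Prod.ext ?_ ?_
    · simp only [List.length_cons, List.range_succ_eq_map, List.map_cons, List.map_map,
        List.sum_cons, Function.comp_def, Nat.succ_eq_add_one]
      have hc : ∀ j : Nat, F (i + ((j + 1 : Nat) : Int) * m) = F ((i + m) + (j : Int) * m) := by
        intro j; congr 1; push_cast; ring
      rw [List.map_congr_left (fun j _ => hc j)]
      push_cast
      ring_nf
    · simp only [List.length_cons]; push_cast; ring

-- each box's contribution equals M * (element of the DESCENDING sort at position (j+1)*M - 1)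
theorem pointwise (t : List Int) (ht : t.Pairwise (· ≤ ·)) (M j : Nat) (hM : 0 < M)
    (hk : j * M + M ≤ t.length) :
    (PySem.List.min? (PySem.List.slice t.reverse (some ((j : Int) * (M : Int))) (some ((j : Int) * (M : Int) + (M : Int)))) (fun x => x)).getD 0 * (M : Int)
      = (M : Int) * t.reverse.getD ((j + 1) * M - 1) 0 := by
  have e1 : ((j : Int) * (M : Int)) = ((j * M : Nat) : Int) := by push_cast; ring
  have e2 : (j : Int) * (M : Int) + (M : Int) = ((j * M : Nat) : Int) + ((M : Nat) : Int) := by rw [e1]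
  rw [e2, e1, PySem.List.slice_natCast_add, box_min t ht M hM j hk]
  have hjm : (j + 1) * M = j * M + M := by ring
  have hlt : (j + 1) * M - 1 < t.reverse.length := by
    rw [List.length_reverse]; omega
  have hget : t.reverse.getD ((j + 1) * M - 1) 0 = t.reverse[(j + 1) * M - 1]'hlt := by
    simp [List.getD, List.getElem?_eq_getElem hlt]
  rw [hget, List.getElem_reverse]
  have : t.length - 1 - ((j + 1) * M - 1) = t.length - (j * M + M) := by omega
  simp only [this]
  ring

theorem floordiv_nonpos_of_nonneg_of_neg (a b : Int) (ha : 0 ≤ a) (h : b < 0) :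
    PySem.Int.floordiv a b ≤ 0 := by
  by_contra hq
  rw [Int.not_le] at hq
  have h1 := PySem.Int.floordiv_mul_add_mod a b
  have h2 := (PySem.Int.mod_neg_bounds (a := a) h).2
  have h3 : PySem.Int.floordiv a b * b < 0 := mul_neg_of_pos_of_neg hq h
  omega

-- sorting descending is reversing the ascending sort (values are Ints, so equal keys are equal elements)
theorem rev_sort (xs : List Int) :
    PySem.List.sorted xs (fun x => x) true = (PySem.List.sorted xs (fun x => x) false).reverse := by
  have h := PySem.List.eq_of_perm_of_pairwise_le_of_injective (fun x : Int => x)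
    (fun a b h => h)
    (l₁ := (PySem.List.sorted xs (fun x => x) true).reverse)
    (l₂ := PySem.List.sorted xs (fun x => x) false)
    (PySem.List.sorted_perm xs (fun x => x) true |> fun hp => (List.reverse_perm _).trans hp
      |> fun hp => hp.trans (PySem.List.sorted_perm xs (fun x => x) false).symm)
    (by simpa [List.pairwise_reverse] using PySem.List.sorted_pairwise_rev xs (fun x => x))
    (PySem.List.sorted_pairwise xs (fun x => x))
  calc PySem.List.sorted xs (fun x => x) true
      = ((PySem.List.sorted xs (fun x => x) true).reverse).reverse := by simp
    _ = _ := by rw [h]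

-- A equals M * boxG of the descending sort (m = M > 0)
theorem a_side (score : List Int) (M : Nat) (hM : 0 < M) :
    solution 0 (M : Int) score = (M : Int) * boxG M 0 (PySem.List.sorted score (fun x => x) true) := by
  simp only [solution]
  set t := PySem.List.sorted score (fun x => x) false with hT
  have hlen : t.length = score.length := PySem.List.length_sorted score (fun x => x) false
  set N := score.length with hN
  rw [rev_sort score, ← hT]
  have hrl : (t.reverse.length : Int) = (N : Int) := by simp [hlen]
  rw [hrl, PySem.Int.floordiv_natCast]
  set T := N / M with hTdef
  rw [foldA (M : Int)
      (fun idx => (PySem.List.min? (PySem.List.slice t.reverse (some idx) (some (idx + (M:Int)))) (fun x => x)).getD 0 * (M:Int))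
      (PySem.List.pyRange 0 ((T:Nat):Int) 1) 0 0]
  rw [PySem.List.pyRange_one]
  simp only [List.map_map, List.length_map, List.length_range, Int.sub_zero, Int.zero_add,
    Int.toNat_natCast, Function.comp_def]
  have ht : t.Pairwise (· ≤ ·) := PySem.List.sorted_pairwise score (fun x => x)
  have hcongr : ∀ j ∈ List.range T,
      (PySem.List.min? (PySem.List.slice t.reverse (some ((j:Int) * (M:Int))) (some ((j:Int) * (M:Int) + (M:Int)))) (fun x => x)).getD 0 * (M:Int)
        = (M:Int) * t.reverse.getD ((j + 1) * M - 1) 0 := by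
    intro j hj
    rw [List.mem_range] at hj
    have hk : j * M + M ≤ t.length := by
      have h1 : (j + 1) * M ≤ (N / M) * M := Nat.mul_le_mul_right M hj
      have h2 : (N / M) * M ≤ N := Nat.div_mul_le_self N M
      have h3 : (j + 1) * M = j * M + M := by ring
      rw [hlen]; omega
    exact pointwise t ht M j hM hk
  rw [List.map_congr_left hcongr, List.sum_map_mul_left]
  rw [boxG_zero' M hM t.reverse]
  have : t.reverse.length / M = T := by rw [List.length_reverse, hlen]
  rw [this]

-- B equals the same (m = M > 0, boxes > 0 path)
theorem b_side (score : List Int) (M : Nat) (hM : 0 < M)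
    (hbox : ¬ PySem.Int.floordiv (score.length : Int) (M : Int) ≤ 0) :
    solution_alt 0 (M : Int) score = (M : Int) * boxG M 0 (PySem.List.sorted score (fun x => x) true) := by
  simp only [solution_alt]
  rw [if_neg hbox]
  set cnt := score.foldl (fun (d : PySem.Dict Int Int) s => d.insert s (d.getD s 0 + 1)) PySem.Dict.empty with hcntd
  have hkeys : cnt.keys = PySem.Set.ofList score := by
    rw [hcntd, PySem.Dict.keys_foldl_insert]
    simp [PySem.Dict.keys_empty, PySem.Set.update_nil_left]
  have hget : ∀ v : Int, cnt.getD v 0 = (score.count v : Int) := by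
    intro v
    rw [hcntd, PySem.Dict.getD_foldl_insert_add_one]
    simp [PySem.Dict.getD_empty]
  set u := PySem.List.sorted score (fun x => x) true with hu
  set ks := PySem.List.sorted cnt.keys (fun x => x) true with hks
  have hup : u.Pairwise (· ≥ ·) := by
    have := PySem.List.sorted_pairwise_rev score (fun x => x)
    simpa [ge_iff_le] using this
  have hksnd : ks.Nodup := by
    have hkn : cnt.keys.Nodup := by rw [hkeys]; exact PySem.Set.nodup_ofList score
    exact ((PySem.List.sorted_perm cnt.keys (fun x => x) true).symm).nodup hkn
  have hksp : ks.Pairwise (· > ·) := by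
    have h1 : ks.Pairwise (fun a b => b ≤ a) := PySem.List.sorted_pairwise_rev cnt.keys (fun x => x)
    have h2 : ks.Pairwise (fun a b => a ≠ b) := hksnd
    exact (h1.and h2).imp (fun h => lt_of_le_of_ne h.1 (Ne.symm h.2))
  have hmem : ∀ x : Int, x ∈ ks ↔ x ∈ u := by
    intro x
    rw [hks, hu, PySem.List.mem_sorted, PySem.List.mem_sorted, hkeys, PySem.Set.mem_ofList]
  have hcnt' : ∀ v ∈ ks, cnt.getD v 0 = (u.count v : Int) := by
    intro v _
    rw [hget v]
    congr 1
    exact ((PySem.List.sorted_perm score (fun x => x) true).count_eq v).symm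
  have hz : (fun (st : Int × Int) v =>
        let c2 := st.2 + cnt.getD v 0
        (st.1 + v * (PySem.Int.floordiv c2 (M:Int) - PySem.Int.floordiv st.2 (M:Int)), c2))
      = (fun (st : Int × Int) v =>
        (st.1 + v * (PySem.Int.floordiv (st.2 + cnt.getD v 0) (M:Int) - PySem.Int.floordiv st.2 (M:Int)),
         st.2 + cnt.getD v 0)) := rfl
  rw [hz]
  have hc0 : ((0 : Int), (0 : Int)) = ((0 : Int), ((0 : Nat) : Int)) := by norm_num
  rw [hc0, bmain M hM (fun v => cnt.getD v 0) ks u 0 0 hksp hup hmem hcnt']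
  ring

theorem main_eq (m : Int) (score : List Int) (hm : m ≠ 0) :
    solution 0 m score = solution_alt 0 m score := by
  rcases lt_or_gt_of_ne hm with hneg | hpos
  · -- m < 0 : A's loop is empty, B takes the boxes ≤ 0 branch
    have hb : PySem.Int.floordiv ((score.length : Int)) m ≤ 0 :=
      floordiv_nonpos_of_nonneg_of_neg _ _ (by positivity) hneg
    have ha : PySem.Int.floordiv (((PySem.List.sorted score (fun x => x) true).length : Int)) m ≤ 0 := by
      rwa [PySem.List.length_sorted]
    simp only [solution, solution_alt]
    rw [if_pos hb, PySem.List.pyRange_one_eq_nil (by simpa using ha)]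
    simp
  · -- m > 0
    obtain ⟨M, rfl⟩ : ∃ M : Nat, m = (M : Nat) := ⟨m.toNat, (Int.toNat_of_nonneg hpos.le).symm⟩
    have hM : 0 < M := by exact_mod_cast hpos
    by_cases hbox : PySem.Int.floordiv ((score.length : Int)) (M : Int) ≤ 0
    · -- zero full boxes: both are 0
      have ha : PySem.Int.floordiv (((PySem.List.sorted score (fun x => x) true).length : Int)) (M : Int) ≤ 0 := by
        rwa [PySem.List.length_sorted]
      simp only [solution, solution_alt]
      rw [if_pos hbox, PySem.List.pyRange_one_eq_nil (by simpa using ha)]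
      simp
    · rw [a_side score M hM, b_side score M hM hbox]

theorem sol_irrel_k (k k' m : Int) (score : List Int) : solution k m score = solution k' m score := rfl
theorem solalt_irrel_k (k k' m : Int) (score : List Int) : solution_alt k m score = solution_alt k' m score := rfl

-- ===== VERDICT (by name: the statement is the Claim_ definition above) =====
theorem solution_spec : Claim_equal_solution := by
  intro k m score _ hpre
  unfold Spec_solution
  rw [sol_irrel_k k 0, solalt_irrel_k k 0]
  exact main_eq m score hpre
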